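-- pv_equiv track=rewrite | github.com/vibeoracle/va_vlaim_help_scraper2 | va_claim_help_scraper2.py | flag_strategies
-- ===== SOURCE A (Python) =====
-- from typing import Dict, List, Any, Tuple
--
-- def flag_strategies(text: str, kw_to_strats: Dict[str, List[str]]) -> Tuple[List[str], List[str]]:
--     text_lower = text.lower() if text else ""
--     matched_keywords = []
--     matched_strategies = set()
--     for kw, strategies in kw_to_strats.items():
--         if kw and kw in text_lower:
--             matched_keywords.append(kw)
--             matched_strategies.update(strategies)
--     return matched_keywords, sorted(matched_strategies)
-- ===== SOURCE B (Python) =====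
-- def flag_strategies(text, kw_to_strats):
--     tl = text.lower()
--     n = len(tl)
--     # index the text once: for each keyword length m, the set of all length-m substrings
--     subs = {m: {tl[i:i + m] for i in range(n - m + 1)}
--             for m in {len(kw) for kw in kw_to_strats if kw}}
--     hits = [(kw, strats) for kw, strats in kw_to_strats.items()
--             if kw and kw in subs[len(kw)]]
--     pool = {s for _, strats in hits for s in strats}
--     return [kw for kw, _ in hits], sorted(pool)
-- ===== Notes on version B (the rewrite author's own statement) =====
-- stated objective: faster
-- what changed: A's single loop that appends keywords and incrementally updates a strategy set (one 'kw in text' scan per keyword) is replaced by building a hash index of the text's substrings bucketed by keyword length, filtering the items by one set lookup each, then one flatten + dedup + sort of the surviving strategy lists.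
import Mathlib
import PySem

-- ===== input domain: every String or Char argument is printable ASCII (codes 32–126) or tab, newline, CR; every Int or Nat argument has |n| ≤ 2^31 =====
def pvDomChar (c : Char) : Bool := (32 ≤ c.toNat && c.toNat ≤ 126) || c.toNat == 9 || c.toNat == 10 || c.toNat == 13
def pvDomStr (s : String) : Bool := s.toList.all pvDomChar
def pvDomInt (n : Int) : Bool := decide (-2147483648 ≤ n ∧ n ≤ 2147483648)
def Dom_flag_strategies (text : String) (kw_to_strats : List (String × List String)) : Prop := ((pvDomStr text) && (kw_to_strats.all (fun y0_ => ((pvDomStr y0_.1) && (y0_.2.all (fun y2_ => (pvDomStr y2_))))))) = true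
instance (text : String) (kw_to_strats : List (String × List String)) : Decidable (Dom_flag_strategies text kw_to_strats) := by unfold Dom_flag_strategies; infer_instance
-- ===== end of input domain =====

-- B (objective: faster) replaces A's loop (per-keyword `kw in text` scan + incremental
-- set update) by a substring index of the text (hash sets of its substrings, bucketed by
-- keyword length), a filter of the items by one set lookup each, then one flatten +
-- dedup + sort: the per-keyword scan of the text disappears.

-- ===== PORT A =====
-- literal port of A: one loop over the items, appending matched keywords and
-- updating a set of strategies; `kw in text_lower` is PySem.Str.isIn.
def flag_strategies (text : String) (kw_to_strats : List (String × List String)) : List String × List String :=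
  let text_lower := if text ≠ "" then PySem.Str.lower text else ""
  let res := kw_to_strats.foldl
    (fun (acc : List String × PySem.Set String) p =>
      if p.1 ≠ "" ∧ PySem.Str.isIn p.1 text_lower then
        (acc.1 ++ [p.1], PySem.Set.update acc.2 p.2)
      else acc)
    ([], PySem.Set.empty)
  (res.1, PySem.List.sorted res.2 (fun x => x) false)

-- ===== PORT B =====
-- Source B's {tl[i:i+m] for i in range(n - m + 1)}: the slice tl[i:i+m] with 0 ≤ i,
-- i+m ≤ n is exactly (tl.drop i).take m; Python's empty range for m > n is the
-- empty Nat range tl.length + 1 - m.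
def subsOfLen (tl : List Char) (m : Nat) : PySem.Set (List Char) :=
  PySem.Set.ofList ((List.range (tl.length + 1 - m)).map (fun i => (tl.drop i).take m))

def flag_strategies_alt (text : String) (kw_to_strats : List (String × List String)) : List String × List String :=
  let tl := (PySem.Str.lower text).toList
  let lens : PySem.Set Nat :=
    PySem.Set.ofList (kw_to_strats.filterMap (fun p => if p.1 ≠ "" then some p.1.toList.length else none))
  let subs : PySem.Dict Nat (PySem.Set (List Char)) :=
    lens.foldl (fun d m => d.insert m (subsOfLen tl m)) PySem.Dict.empty
  let hits := kw_to_strats.filter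
    (fun p => p.1 ≠ "" && PySem.Set.contains (subs.getD p.1.toList.length PySem.Set.empty) p.1.toList)
  (hits.map (fun p => p.1),
   PySem.List.sorted (PySem.Set.ofList (hits.flatMap (fun p => p.2))) (fun x => x) false)

-- ===== PRECONDITION & SPEC =====
def Spec_flag_strategies (text : String) (kw_to_strats : List (String × List String)) (out : List String × List String) : Prop := out = flag_strategies_alt text kw_to_strats
instance (text : String) (kw_to_strats : List (String × List String)) (out : List String × List String) : Decidable (Spec_flag_strategies text kw_to_strats out) := by unfold Spec_flag_strategies; infer_instance

-- ===== CLAIM (what is proved, stated in full; the proofs are below) =====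
def Claim_equal_flag_strategies : Prop := ∀ (text : String) (kw_to_strats : List (String × List String)), Dom_flag_strategies text kw_to_strats → Spec_flag_strategies text kw_to_strats (flag_strategies text kw_to_strats)

-- ===== LEMMAS AND PROOFS =====

-- a dict built by inserting (k, f k) for every key of a list answers f m on members
theorem get?_foldl_insert (f : Nat → PySem.Set (List Char)) (L : List Nat)
    (d : PySem.Dict Nat (PySem.Set (List Char))) (m : Nat) :
    (L.foldl (fun d k => d.insert k (f k)) d).get? m
      = if m ∈ L then some (f m) else d.get? m := by
  induction L generalizing d with
  | nil => simp
  | cons k L ih =>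
    simp only [List.foldl_cons, ih, List.mem_cons]
    by_cases hL : m ∈ L
    · simp [hL]
    · by_cases hk : m = k
      · subst hk
        simp [hL, PySem.Dict.get?_insert_self]
      · simp [hL, hk, PySem.Dict.get?_insert_of_ne _ _ hk]

theorem getD_foldl_insert (f : Nat → PySem.Set (List Char)) (L : List Nat)
    (d : PySem.Dict Nat (PySem.Set (List Char))) (m : Nat) (hm : m ∈ L) :
    (L.foldl (fun d k => d.insert k (f k)) d).getD m PySem.Set.empty = f m := by
  rw [PySem.Dict.getD_eq_get?_getD, get?_foldl_insert, if_pos hm]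
  rfl

-- membership in the length-m substring bucket is exactly substring occurrence
theorem contains_subsOfLen (tl kw : List Char) (hk : kw ≠ []) :
    PySem.Set.contains (subsOfLen tl kw.length) kw = PySem.Chars.isIn kw tl := by
  have hm : 0 < kw.length := List.length_pos_iff.mpr hk
  rw [Bool.eq_iff_iff, PySem.Set.contains_iff, ← PySem.Chars.exists_prefix_drop_iff_isIn]
  unfold subsOfLen
  rw [PySem.Set.mem_ofList]
  simp only [List.mem_map, List.mem_range]
  constructor
  · rintro ⟨i, -, heq⟩
    exact ⟨i, List.prefix_iff_eq_take.mpr heq.symm⟩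
  · rintro ⟨j, hj⟩
    have hlen : kw.length ≤ (tl.drop j).length := hj.length_le
    simp only [List.length_drop] at hlen
    exact ⟨j, by omega, (List.prefix_iff_eq_take.mp hj).symm⟩

-- A's fold, characterised on an arbitrary accumulator (with A's own condition)
theorem foldA (tl : String) (kws : List (String × List String))
    (acc : List String × PySem.Set String) :
    kws.foldl
      (fun (acc : List String × PySem.Set String) p =>
        if p.1 ≠ "" ∧ PySem.Str.isIn p.1 tl then
          (acc.1 ++ [p.1], PySem.Set.update acc.2 p.2)
        else acc) acc
    = (acc.1 ++ (kws.filter (fun p => decide (p.1 ≠ "" ∧ PySem.Str.isIn p.1 tl = true))).map (fun p => p.1),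
       PySem.Set.update acc.2
         ((kws.filter (fun p => decide (p.1 ≠ "" ∧ PySem.Str.isIn p.1 tl = true))).flatMap (fun p => p.2))) := by
  induction kws generalizing acc with
  | nil => simp [PySem.Set.update]
  | cons p kws ih =>
    simp only [List.foldl_cons, List.filter_cons]
    by_cases h : (p.1 ≠ "" ∧ PySem.Str.isIn p.1 tl = true)
    · rw [if_pos h, ih, if_pos (by simpa using h)]
      simp [PySem.Set.update, List.foldl_append]
    · rw [if_neg h, ih, if_neg (by simpa using h)]

-- B's filter (set lookup in the substring index) selects exactly A's items
theorem filter_eq (text : String) (kws : List (String × List String)) :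
    kws.filter
      (fun p => p.1 ≠ "" && PySem.Set.contains
        (((PySem.Set.ofList (kws.filterMap (fun p => if p.1 ≠ "" then some p.1.toList.length else none))).foldl
            (fun d m => d.insert m (subsOfLen (PySem.Str.lower text).toList m)) PySem.Dict.empty).getD
          p.1.toList.length PySem.Set.empty) p.1.toList)
    = kws.filter (fun p => decide (p.1 ≠ "" ∧ PySem.Str.isIn p.1 (PySem.Str.lower text) = true)) := by
  apply List.filter_congr
  intro p hp
  by_cases h1 : p.1 = ""
  · simp [h1]
  · have hk : p.1.toList ≠ [] := fun h => h1 (String.toList_eq_nil_iff.mp h)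
    have hmem : p.1.toList.length ∈
        PySem.Set.ofList (kws.filterMap (fun p => if p.1 ≠ "" then some p.1.toList.length else none)) := by
      rw [PySem.Set.mem_ofList, List.mem_filterMap]
      exact ⟨p, hp, by simp [h1]⟩
    rw [getD_foldl_insert _ _ _ _ hmem, contains_subsOfLen _ _ hk]
    simp [h1]

-- ===== VERDICT (by name: the statement is the Claim_ definition above) =====
theorem flag_strategies_spec : Claim_equal_flag_strategies := by
  intro text kws _
  unfold Spec_flag_strategies flag_strategies flag_strategies_alt
  have htl : (if text ≠ "" then PySem.Str.lower text else "") = PySem.Str.lower text := by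
    by_cases h : text = ""
    · subst h; simp; rfl
    · simp [h]
  simp only [htl, foldA, filter_eq]
  simp [PySem.Set.update_nil_left]
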